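-- pv_equiv track=rewrite | github.com/vijayaragavan-ARR/Sign_Stream---Deep-learning-system-for-real-time-Indian-sign-language-generation | Content/Python/app.py | classify_sentence_type
-- ===== SOURCE A (Python) =====
-- auxiliary_verbs = {'be', 'am', 'is', 'are', 'was', 'were', 'been', 'being', 'has', 'had', 'does','did'}
--
-- negative_words = {'not', 'no', "don't", "doesn't", "didn't", "won't", "can't", "couldn't", "isn't", "aren't", "wasn't", "weren't"}
--
-- questionary_words = {'where', 'who', 'what', 'when', 'how', 'why'}
--
-- def classify_sentence_type(tagged_words):
--     """Classify the type of sentence: simple, question, imperative, or negative."""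
--     first_word_tag = tagged_words[0][1]
--     first_word = tagged_words[0][0].casefold()
--
--     if first_word_tag == 'MD' or first_word.casefold() in auxiliary_verbs or any(word[0].casefold() in questionary_words for word in tagged_words):
--         return 'question'
--
--     elif first_word_tag.startswith('V') and first_word != 'be' and first_word_tag != 'MD':
--         return 'imperative'
--
--     elif any(word[0].casefold() in negative_words for word in tagged_words):
--         return 'negative'
--
--     else:
--         return 'simple'
-- ===== SOURCE B (Python) =====
-- auxiliary_verbs = {'be', 'am', 'is', 'are', 'was', 'were', 'been', 'being', 'has', 'had', 'does','did'}
--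
-- negative_words = {'not', 'no', "don't", "doesn't", "didn't", "won't", "can't", "couldn't", "isn't", "aren't", "wasn't", "weren't"}
--
-- questionary_words = {'where', 'who', 'what', 'when', 'how', 'why'}
--
-- _LABELS = ('question', 'imperative', 'negative', 'simple')
--
-- def _word_rank(word):
--     """Priority rank a single word contributes: question=0, negative=2, neutral=3."""
--     w = word.casefold()
--     if w in questionary_words:
--         return 0
--     if w in negative_words:
--         return 2
--     return 3
--
-- def classify_sentence_type(tagged_words):
--     """Classify by priority-rank minimisation: every signal is mapped to a numeric
--     rank (question=0, imperative=1, negative=2, simple=3); the answer is the label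
--     of the minimum rank, instead of an if/elif ladder of membership scans."""
--     first_word = tagged_words[0][0].casefold()
--     tag = tagged_words[0][1]
--     if tag == 'MD' or first_word in auxiliary_verbs:
--         rank = 0
--     elif tag.startswith('V') and first_word != 'be':
--         rank = 1
--     else:
--         rank = 3
--     for word, _ in tagged_words:
--         rank = min(rank, _word_rank(word))
--     return _LABELS[rank]
-- ===== Notes on version B (the rewrite author's own statement) =====
-- stated objective: alternative
-- what changed: B replaces A's if/elif ladder of short-circuiting any() membership scans by a priority-rank minimisation: each word is mapped once to a numeric rank (question=0, negative=2, neutral=3), the head contributes a rank (0 for MD/auxiliary, 1 for verb-imperative, else 3), and the answer is the label table indexed by the minimum rank.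
import Mathlib
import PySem

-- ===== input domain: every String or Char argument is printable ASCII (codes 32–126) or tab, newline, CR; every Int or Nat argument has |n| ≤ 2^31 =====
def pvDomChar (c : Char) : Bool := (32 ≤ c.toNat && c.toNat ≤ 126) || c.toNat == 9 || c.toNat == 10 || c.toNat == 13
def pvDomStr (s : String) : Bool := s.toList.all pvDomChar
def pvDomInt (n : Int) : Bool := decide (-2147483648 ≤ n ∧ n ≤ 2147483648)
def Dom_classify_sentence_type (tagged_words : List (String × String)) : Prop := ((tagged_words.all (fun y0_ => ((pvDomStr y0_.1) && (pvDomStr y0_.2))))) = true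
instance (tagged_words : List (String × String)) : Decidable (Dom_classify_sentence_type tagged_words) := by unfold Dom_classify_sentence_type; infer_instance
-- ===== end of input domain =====

-- B replaces A's if/elif ladder of any() scans by a priority-rank minimisation
-- (question=0, imperative=1, negative=2, simple=3): answer = label of the minimum rank.

-- ===== PORT A =====
-- Python module-level sets, ported as PySem.Set (distinct elements; used only for membership).
def pvAuxiliaryVerbs : PySem.Set String :=
  PySem.Set.ofList ["be", "am", "is", "are", "was", "were", "been", "being", "has", "had", "does", "did"]
def pvNegativeWords : PySem.Set String :=
  PySem.Set.ofList ["not", "no", "don't", "doesn't", "didn't", "won't", "can't", "couldn't", "isn't", "aren't", "wasn't", "weren't"]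
def pvQuestionaryWords : PySem.Set String :=
  PySem.Set.ofList ["where", "who", "what", "when", "how", "why"]

-- str.casefold = PySem.Str.lower: exact on the printable-ASCII domain Dom_.
def classify_sentence_type (tagged_words : List (String × String)) : String :=
  match PySem.List.pyGet? tagged_words 0 with
  | none => ""   -- IndexError on empty input; excluded by Pre_
  | some first =>
    let first_word_tag := first.2
    let first_word := PySem.Str.lower first.1
    if first_word_tag == "MD" || PySem.Set.contains pvAuxiliaryVerbs (PySem.Str.lower first_word)
        || tagged_words.any (fun word => PySem.Set.contains pvQuestionaryWords (PySem.Str.lower word.1)) then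
      "question"
    else if PySem.Str.startswith first_word_tag "V" && !(first_word == "be") && !(first_word_tag == "MD") then
      "imperative"
    else if tagged_words.any (fun word => PySem.Set.contains pvNegativeWords (PySem.Str.lower word.1)) then
      "negative"
    else
      "simple"

-- ===== PORT B =====
def pvLabels : List String := ["question", "imperative", "negative", "simple"]

def pvWordRank (word : String) : Int :=
  let w := PySem.Str.lower word
  if PySem.Set.contains pvQuestionaryWords w then 0
  else if PySem.Set.contains pvNegativeWords w then 2
  else 3

def classify_sentence_type_alt (tagged_words : List (String × String)) : String :=
  match tagged_words with
  | [] => ""   -- IndexError on empty input; excluded by Pre_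
  | first :: _ =>
    let first_word := PySem.Str.lower first.1
    let tag := first.2
    let rank0 : Int :=
      if tag == "MD" || PySem.Set.contains pvAuxiliaryVerbs first_word then 0
      else if PySem.Str.startswith tag "V" && !(first_word == "be") then 1
      else 3
    let rank := tagged_words.foldl (fun m w => min m (pvWordRank w.1)) rank0
    (PySem.List.pyGet? pvLabels rank).getD ""

-- ===== PRECONDITION & SPEC =====
-- Pre_ excludes only the empty list, on which tagged_words[0] raises IndexError in A.
def Pre_classify_sentence_type (tagged_words : List (String × String)) : Prop := tagged_words ≠ []
instance (tagged_words : List (String × String)) : Decidable (Pre_classify_sentence_type tagged_words) := by unfold Pre_classify_sentence_type; infer_instance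
def pvWitness_classify_sentence_type : (List (String × String)) := [("Go", "VB"), ("home", "NN")]

def Spec_classify_sentence_type (tagged_words : List (String × String)) (out : String) : Prop := out = classify_sentence_type_alt tagged_words
instance (tagged_words : List (String × String)) (out : String) : Decidable (Spec_classify_sentence_type tagged_words out) := by unfold Spec_classify_sentence_type; infer_instance

-- ===== CLAIM =====
def Claim_equal_classify_sentence_type : Prop := ∀ (tagged_words : List (String × String)), Dom_classify_sentence_type tagged_words → Pre_classify_sentence_type tagged_words → Spec_classify_sentence_type tagged_words (classify_sentence_type tagged_words)

-- ===== LEMMAS AND PROOFS =====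

theorem lowerChar_idem (c : Char) :
    PySem.Chars.lowerChar (PySem.Chars.lowerChar c) = PySem.Chars.lowerChar c := by
  by_cases h1 : PySem.Chars.isupper c = true
  · have h1' := h1
    simp only [PySem.Chars.isupper, Bool.and_eq_true, decide_eq_true_eq, Char.le_def,
      UInt32.le_iff_toNat_le] at h1'
    have hz : c.toNat ≤ 90 := h1'.2
    have ha : 65 ≤ c.toNat := h1'.1
    have hval : (c.toNat + 32).isValidChar := Or.inl (by omega)
    have ht : (Char.ofNat (c.toNat + 32)).toNat = c.toNat + 32 := by
      rw [Char.toNat_ofNat, if_pos hval]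
    have hZ : ('Z').toNat = 90 := rfl
    have hle : ¬ (Char.ofNat (c.toNat + 32) ≤ 'Z') := by
      simp only [Char.le_def, UInt32.le_iff_toNat_le]
      show ¬ ((Char.ofNat (c.toNat + 32)).toNat ≤ ('Z').toNat)
      rw [ht, hZ]; omega
    have hne : PySem.Chars.isupper (Char.ofNat (c.toNat + 32)) = false := by
      simp [PySem.Chars.isupper, hle]
    simp [PySem.Chars.lowerChar, h1, hne]
  · simp only [PySem.Chars.lowerChar, if_neg h1]

theorem str_lower_idem (s : String) :
    PySem.Str.lower (PySem.Str.lower s) = PySem.Str.lower s := by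
  simp [PySem.Str.lower, PySem.Chars.lower, List.map_map, Function.comp_def, lowerChar_idem]

theorem pvLabels_get (r : Int) (h0 : 0 ≤ r) (h3 : r ≤ 3) :
    (PySem.List.pyGet? pvLabels r).getD ""
      = if r = 0 then "question" else if r = 1 then "imperative"
        else if r = 2 then "negative" else "simple" := by
  interval_cases r <;> decide

-- the foldl of min over word ranks, characterised by the two membership scans
theorem foldl_min_rank (l : List (String × String)) :
    ∀ a : Int, a ≤ 3 →
      l.foldl (fun m w => min m (pvWordRank w.1)) a
        = if l.any (fun w => PySem.Set.contains pvQuestionaryWords (PySem.Str.lower w.1)) then min a 0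
          else if l.any (fun w => PySem.Set.contains pvNegativeWords (PySem.Str.lower w.1)) then min a 2
          else a := by
  induction l with
  | nil => intro a _; simp
  | cons x xs ih =>
    intro a ha
    have hrank : pvWordRank x.1
        = if PySem.Set.contains pvQuestionaryWords (PySem.Str.lower x.1) then 0
          else if PySem.Set.contains pvNegativeWords (PySem.Str.lower x.1) then 2 else 3 := rfl
    simp only [List.foldl_cons, List.any_cons, Bool.or_eq_true]
    rw [ih _ (by rw [hrank]; split_ifs <;> omega), hrank]
    by_cases hq : PySem.Set.contains pvQuestionaryWords (PySem.Str.lower x.1) = true <;>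
      by_cases hn : PySem.Set.contains pvNegativeWords (PySem.Str.lower x.1) = true <;>
      by_cases hqs : (xs.any fun w => PySem.Set.contains pvQuestionaryWords (PySem.Str.lower w.1)) = true <;>
      by_cases hns : (xs.any fun w => PySem.Set.contains pvNegativeWords (PySem.Str.lower w.1)) = true <;>
      simp only [hq, hn, hqs, hns, if_false, Bool.false_eq_true, if_pos, or_true, or_false] <;>
      omega

-- both if-ladders, abstracted over their Boolean atoms, equal a common canonical ladder
theorem ladderA (md aux sw be q n : Bool) :
    (if (md || aux || q) = true then "question"
     else if (sw && !be && !md) = true then "imperative"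
     else if n = true then "negative" else "simple")
    = (if (md || aux || q) = true then "question"
       else if (sw && !be) = true then "imperative"
       else if n = true then "negative" else "simple") := by
  cases md <;> cases aux <;> cases sw <;> cases be <;> cases q <;> cases n <;> decide

theorem ladderB (md aux sw be q n : Bool) :
    (if (if q = true then min (if (md || aux) = true then (0:Int) else if (sw && !be) = true then 1 else 3) 0
         else if n = true then min (if (md || aux) = true then (0:Int) else if (sw && !be) = true then 1 else 3) 2
         else if (md || aux) = true then (0:Int) else if (sw && !be) = true then 1 else 3) = 0 then "question"
     else if (if q = true then min (if (md || aux) = true then (0:Int) else if (sw && !be) = true then 1 else 3) 0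
         else if n = true then min (if (md || aux) = true then (0:Int) else if (sw && !be) = true then 1 else 3) 2
         else if (md || aux) = true then (0:Int) else if (sw && !be) = true then 1 else 3) = 1 then "imperative"
     else if (if q = true then min (if (md || aux) = true then (0:Int) else if (sw && !be) = true then 1 else 3) 0
         else if n = true then min (if (md || aux) = true then (0:Int) else if (sw && !be) = true then 1 else 3) 2
         else if (md || aux) = true then (0:Int) else if (sw && !be) = true then 1 else 3) = 2 then "negative" else "simple")
    = (if (md || aux || q) = true then "question"
       else if (sw && !be) = true then "imperative"
       else if n = true then "negative" else "simple") := by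
  cases md <;> cases aux <;> cases sw <;> cases be <;> cases q <;> cases n <;> decide

-- ===== VERDICT =====
theorem classify_sentence_type_spec : Claim_equal_classify_sentence_type := by
  intro tw _hdom hpre
  unfold Spec_classify_sentence_type
  cases tw with
  | nil => exact absurd rfl hpre
  | cons first rest =>
    simp only [classify_sentence_type, classify_sentence_type_alt,
      PySem.List.pyGet?_zero_cons, str_lower_idem]
    rw [foldl_min_rank (first :: rest) _ (by split_ifs <;> omega)]
    rw [pvLabels_get _ (by split_ifs <;> omega) (by split_ifs <;> omega)]
    rw [ladderA, ladderB]
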